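-- pv_equiv track=rewrite | github.com/kiwibrowser/src | third_party/blink/renderer/bindings/scripts/utilities.py | format_remove_duplicates
-- ===== SOURCE A (Python) =====
-- def format_remove_duplicates(text, patterns):
--     """Removes duplicated line-basis patterns.
--
--     Based on simple pattern matching, removes duplicated lines in a block
--     of lines.  Lines that match with a same pattern are considered as
--     duplicates.
--
--     Designed to be used as a filter function for Jinja2.
--
--     Args:
--         text: A str of multi-line text.
--         patterns: A list of str where each str represents a simple
--             pattern.  The patterns are not considered as regexp, and
--             exact match is applied.
--
--     Returns:
--         A formatted str with duplicates removed.
--     """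
--     pattern_founds = [False] * len(patterns)
--     output = []
--     for line in text.split('\n'):
--         to_be_removed = False
--         for i, pattern in enumerate(patterns):
--             if pattern not in line:
--                 continue
--             if pattern_founds[i]:
--                 to_be_removed = True
--             else:
--                 pattern_founds[i] = True
--         if to_be_removed:
--             continue
--         output.append(line)
--
--     # Let |'\n'.join| emit the last newline.
--     if output:
--         output.append('')
--
--     return '\n'.join(output)
-- ===== SOURCE B (Python) =====
-- def format_remove_duplicates(text, patterns):
--     """Two-phase rewrite: first compute, pattern-major, the first line index
--     containing each pattern; then keep exactly the lines that contain no
--     pattern whose first occurrence is on an earlier line."""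
--     lines = text.split('\n')
--
--     def first_line(p):
--         for j, line in enumerate(lines):
--             if p in line:
--                 return j
--         return len(lines)
--
--     firsts = [first_line(p) for p in patterns]
--     kept = [line for j, line in enumerate(lines)
--             if all(j <= f or p not in line for p, f in zip(patterns, firsts))]
--     if kept:
--         kept.append('')
--     return '\n'.join(kept)
-- ===== Notes on version B (the rewrite author's own statement) =====
-- stated objective: alternative
-- what changed: A's single stateful line-major pass with a mutable per-pattern boolean 'seen' array is replaced by a two-phase pattern-major algorithm: first compute each pattern's first-occurrence line index, then keep exactly the lines containing no pattern whose first occurrence is on an earlier line.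
import Mathlib
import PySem

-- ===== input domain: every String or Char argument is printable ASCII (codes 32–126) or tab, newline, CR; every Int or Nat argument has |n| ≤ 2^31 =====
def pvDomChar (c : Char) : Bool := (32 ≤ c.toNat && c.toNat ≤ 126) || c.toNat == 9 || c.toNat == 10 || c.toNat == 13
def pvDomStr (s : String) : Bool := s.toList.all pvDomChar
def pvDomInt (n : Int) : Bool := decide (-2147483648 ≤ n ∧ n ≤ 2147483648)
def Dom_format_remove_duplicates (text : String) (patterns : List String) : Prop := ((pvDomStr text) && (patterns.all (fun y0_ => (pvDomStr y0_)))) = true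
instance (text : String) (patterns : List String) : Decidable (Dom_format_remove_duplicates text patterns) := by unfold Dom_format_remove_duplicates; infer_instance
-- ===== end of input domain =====

-- B replaces A's stateful per-line boolean-flag scan by a two-phase pattern-major algorithm
-- (first-occurrence line index per pattern, then a filter); alternative structure, same cost.


-- ===== PORT A =====
-- one iteration of A's outer loop: state = (pattern_founds, output); the inner fold is
-- A's 'for i, pattern in enumerate(patterns)' loop with state (to_be_removed, pattern_founds)
def frdStep (patterns : List String) (st : List Bool × List String) (line : String) : List Bool × List String :=
  let r := (PySem.List.enumerate patterns).foldl
    (fun acc ip =>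
      if ! PySem.Str.isIn ip.2 line then acc
      else if PySem.List.pyGetD acc.2 ip.1 false then (true, acc.2)
      else (acc.1, PySem.List.pySetD acc.2 ip.1 true))
    (false, st.1)
  if r.1 then (r.2, st.2) else (r.2, st.2 ++ [line])

def format_remove_duplicates (text : String) (patterns : List String) : String :=
  -- text.split('\n'): the separator is the non-empty literal "\n", so split? is some
  let lines := (PySem.Str.split? text "\n").getD []
  let res := lines.foldl (frdStep patterns) (List.replicate patterns.length false, [])
  let output := if res.2 ≠ [] then res.2 ++ [""] else res.2
  PySem.Str.join "\n" output

-- ===== PORT B =====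
-- B's helper first_line(p): first line index containing p, len(lines) if none
-- (the early 'return j' of the Python loop is the 'some j' of this recursion)
def frdFirstLineAux (p : String) (j : Int) : List String → Option Int
  | [] => none
  | l :: ls => if PySem.Str.isIn p l then some j else frdFirstLineAux p (j+1) ls

def frdFirstLine (lines : List String) (p : String) : Int :=
  (frdFirstLineAux p 0 lines).getD (lines.length : Int)

def format_remove_duplicates_alt (text : String) (patterns : List String) : String :=
  let lines := (PySem.Str.split? text "\n").getD []
  let firsts := patterns.map (frdFirstLine lines)
  let kept := ((PySem.List.enumerate lines).filter (fun jl =>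
      (patterns.zip firsts).all (fun pf => decide (jl.1 ≤ pf.2) || ! PySem.Str.isIn pf.1 jl.2))).map (·.2)
  let kept' := if kept ≠ [] then kept ++ [""] else kept
  PySem.Str.join "\n" kept'

-- ===== PRECONDITION & SPEC =====
def Spec_format_remove_duplicates (text : String) (patterns : List String) (out : String) : Prop := out = format_remove_duplicates_alt text patterns
instance (text : String) (patterns : List String) (out : String) : Decidable (Spec_format_remove_duplicates text patterns out) := by unfold Spec_format_remove_duplicates; infer_instance

-- ===== CLAIM (what is proved, stated in full; the proofs are below) =====
def Claim_equal_format_remove_duplicates : Prop := ∀ (text : String) (patterns : List String), Dom_format_remove_duplicates text patterns → Spec_format_remove_duplicates text patterns (format_remove_duplicates text patterns)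

-- ===== LEMMAS AND PROOFS =====

theorem frdFirstLineAux_ge (p : String) : ∀ (ls : List String) (j x : Int), frdFirstLineAux p j ls = some x → j ≤ x := by
  intro ls
  induction ls with
  | nil => intro j x h; simp [frdFirstLineAux] at h
  | cons l ls ih =>
    intro j x h
    by_cases hin : PySem.Chars.isIn p.toList l.toList = true
    · simp [frdFirstLineAux, hin] at h; omega
    · simp [frdFirstLineAux, hin] at h
      have := ih (j+1) x h; omega
theorem frdFirstLineAux_shift (p : String) : ∀ (ls : List String) (j : Int),
    frdFirstLineAux p (j+1) ls = (frdFirstLineAux p j ls).map (· + 1) := by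
  intro ls
  induction ls with
  | nil => intro j; simp [frdFirstLineAux]
  | cons l ls ih =>
    intro j
    by_cases hin : PySem.Chars.isIn p.toList l.toList = true
    · simp [frdFirstLineAux, hin]
    · simp [frdFirstLineAux, hin, ih]
theorem frdFirstLine_nonneg (lines : List String) (p : String) : 0 ≤ frdFirstLine lines p := by
  unfold frdFirstLine
  cases h : frdFirstLineAux p 0 lines with
  | none => simp
  | some x => simpa using frdFirstLineAux_ge p lines 0 x h
theorem frdFirstLine_cons_pos (l : String) (ls : List String) (p : String)
    (h : PySem.Str.isIn p l = true) : frdFirstLine (l :: ls) p = 0 := by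
  have h' : PySem.Chars.isIn p.toList l.toList = true := by simpa using h
  simp [frdFirstLine, frdFirstLineAux, h']
theorem frdFirstLine_cons_neg (l : String) (ls : List String) (p : String)
    (h : PySem.Str.isIn p l = false) : frdFirstLine (l :: ls) p = 1 + frdFirstLine ls p := by
  unfold frdFirstLine
  have h' : PySem.Chars.isIn p.toList l.toList = false := by simpa using h
  have : frdFirstLineAux p 0 (l :: ls) = (frdFirstLineAux p 0 ls).map (· + 1) := by
    simp [frdFirstLineAux, h']
    simpa using frdFirstLineAux_shift p ls 0
  rw [this]
  cases frdFirstLineAux p 0 ls with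
  | none => simp; omega
  | some x => simp; omega
theorem frdFirstLine_ge_iff (p : String) :
    ∀ (pre rest : List String),
    decide ((pre.length : Int) ≤ frdFirstLine (pre ++ rest) p)
      = ! pre.any (fun l => PySem.Str.isIn p l) := by
  intro pre
  induction pre with
  | nil => intro rest; simpa using frdFirstLine_nonneg rest p
  | cons l pre ih =>
    intro rest
    by_cases hin : PySem.Str.isIn p l
    · rw [List.cons_append, frdFirstLine_cons_pos l _ p hin, List.any_cons, hin]
      simp
    · rw [List.cons_append, frdFirstLine_cons_neg l _ p (by simpa using hin)]
      have := ih rest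
      simp only [List.any_cons, hin, Bool.false_or]
      rw [← this]
      simp only [List.length_cons]
      rw [decide_eq_decide]
      push_cast
      omega
theorem frd_inner (line : String) (ps : List String) :
    ∀ (done : List Bool) (b : Bool) (g : String → Bool),
    (PySem.List.enumerate ps (done.length : Int)).foldl
      (fun acc ip =>
        if ! PySem.Str.isIn ip.2 line then acc
        else if PySem.List.pyGetD acc.2 ip.1 false then (true, acc.2)
        else (acc.1, PySem.List.pySetD acc.2 ip.1 true))
      (b, done ++ ps.map g)
    = (b || ps.any (fun p => PySem.Str.isIn p line && g p),
       done ++ ps.map (fun p => g p || PySem.Str.isIn p line)) := by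
  induction ps with
  | nil => intro done b g; simp [PySem.List.enumerate]
  | cons p ps ih =>
    intro done b g
    have henum : PySem.List.enumerate (p :: ps) (done.length : Int)
        = ((done.length : Int), p) :: PySem.List.enumerate ps ((done.length : Int) + 1) := by
      simp [PySem.List.enumerate]
    rw [henum, List.foldl_cons]
    have hget : ∀ (x : Bool) (t : List Bool),
        PySem.List.pyGetD (done ++ x :: t) (done.length : Int) false = x := by
      intro x t; simp [PySem.List.pyGetD_natCast, List.getD]
    have hset : ∀ (x : Bool) (t : List Bool),
        PySem.List.pySetD (done ++ x :: t) (done.length : Int) true = done ++ true :: t := by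
      intro x t; simp [PySem.List.pySetD_natCast, List.set_append_right]
    have hlen2 : ((done ++ [true]).length : Int) = (done.length : Int) + 1 := by
      simp
    by_cases hin : PySem.Str.isIn p line = true
    · have hin' : PySem.Chars.isIn p.toList line.toList = true := by simpa using hin
      by_cases hg : g p = true
      · simp only [List.map_cons, hin, hg, Bool.not_true, Bool.false_eq_true, if_false, hget, if_true]
        have h1 : done ++ true :: ps.map g = (done ++ [true]) ++ ps.map g := by simp
        rw [h1, ← hlen2, ih (done ++ [true]) true g]
        simp [hin', hg]
      · simp only [Bool.not_eq_true] at hg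
        simp only [List.map_cons, hin, hg, Bool.not_true, Bool.false_eq_true, if_false, hget, hset]
        have h1 : done ++ true :: ps.map g = (done ++ [true]) ++ ps.map g := by simp
        rw [h1, ← hlen2, ih (done ++ [true]) b g]
        simp [hin', hg]
    · simp only [Bool.not_eq_true] at hin
      have hin' : PySem.Chars.isIn p.toList line.toList = false := by simpa using hin
      simp only [List.map_cons, hin, Bool.not_false, if_true]
      have hlen1 : ((done ++ [g p]).length : Int) = (done.length : Int) + 1 := by
        simp
      have h1 : done ++ g p :: ps.map g = (done ++ [g p]) ++ ps.map g := by simp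
      rw [h1, ← hlen1, ih (done ++ [g p]) b g]
      simp [hin']
theorem frd_outer (patterns : List String) (lines : List String) :
    ∀ (rest pre : List String) (acc : List String), lines = pre ++ rest →
    (rest.foldl (frdStep patterns)
       (patterns.map (fun p => pre.any (fun l => PySem.Str.isIn p l)), acc)).2
    = acc ++ ((PySem.List.enumerate rest (pre.length : Int)).filter (fun jl =>
        (patterns.zip (patterns.map (frdFirstLine lines))).all
          (fun pf => decide (jl.1 ≤ pf.2) || ! PySem.Str.isIn pf.1 jl.2))).map (·.2) := by
  intro rest
  induction rest with
  | nil => intro pre acc h; simp [PySem.List.enumerate]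
  | cons line rest ih =>
    intro pre acc h
    rw [List.foldl_cons]
    -- reduce the step with frd_inner (done = [], b = false)
    have hz : ((([] : List Bool)).length : Int) = (0 : Int) := by simp
    have hinner := frd_inner line patterns [] false
      (fun p => pre.any (fun l => PySem.Str.isIn p l))
    simp only [List.nil_append, List.length_nil, Int.natCast_zero] at hinner
    set g : String → Bool := fun p => pre.any (fun l => PySem.Str.isIn p l) with hgdef
    have hstep : frdStep patterns (patterns.map g, acc) line
        = (patterns.map (fun p => g p || PySem.Str.isIn p line),
           if patterns.any (fun p => PySem.Str.isIn p line && g p) then acc else acc ++ [line]) := by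
      unfold frdStep
      simp only [hinner, Bool.false_or]
      cases hany' : patterns.any (fun p => PySem.Str.isIn p line && g p) with
      | true => simp [hgdef]
      | false => simp [hgdef]
    rw [hstep]
    -- new g is the g of pre ++ [line]
    have hgnew : (patterns.map (fun p => g p || PySem.Str.isIn p line))
        = patterns.map (fun p => (pre ++ [line]).any (fun l => PySem.Str.isIn p l)) := by
      simp [hgdef]
    -- condition of B's filter at (pre.length, line) is the negation of A's removal flag
    have hzip : patterns.zip (patterns.map (frdFirstLine lines))
        = patterns.map (fun p => (p, frdFirstLine lines p)) := by
      calc patterns.zip (patterns.map (frdFirstLine lines))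
          = (List.map id patterns).zip (patterns.map (frdFirstLine lines)) := by rw [List.map_id]
        _ = patterns.map (fun p => (id p, frdFirstLine lines p)) := List.zip_map'
        _ = patterns.map (fun p => (p, frdFirstLine lines p)) := by simp
    have hcond : ((patterns.zip (patterns.map (frdFirstLine lines))).all
          (fun pf => decide (((pre.length : Int), line).1 ≤ pf.2) || ! PySem.Str.isIn pf.1 (((pre.length : Int), line)).2))
        = ! patterns.any (fun p => PySem.Str.isIn p line && g p) := by
      rw [hzip, List.all_map]
      have hpt : ∀ p : String,
          ((fun pf => decide (((pre.length : Int), line).1 ≤ pf.2) || ! PySem.Str.isIn pf.1 (((pre.length : Int), line)).2) ∘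
            (fun p => (p, frdFirstLine lines p))) p
          = ! (PySem.Str.isIn p line && g p) := by
        intro p
        simp only [Function.comp]
        rw [show lines = pre ++ (line :: rest) from h, frdFirstLine_ge_iff p pre (line :: rest)]
        simp only [hgdef]
        cases hx : PySem.Str.isIn p line <;> simp [hx]
      rw [List.all_congr rfl hpt]
      simp [List.all_eq_not_any_not]
    have henum : PySem.List.enumerate (line :: rest) (pre.length : Int)
        = ((pre.length : Int), line) :: PySem.List.enumerate rest ((pre.length : Int) + 1) := by
      simp [PySem.List.enumerate]
    rw [henum, List.filter_cons]
    have hlen : ((pre ++ [line]).length : Int) = (pre.length : Int) + 1 := by simp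
    have hrec := ih (pre ++ [line]) (if patterns.any (fun p => PySem.Str.isIn p line && g p) then acc else acc ++ [line]) (by simpa [List.append_assoc] using h)
    rw [hgnew]
    rw [hlen] at hrec
    rw [hrec, hcond]
    cases hany : patterns.any (fun p => PySem.Str.isIn p line && g p) with
    | false => rw [hany] at *; simp
    | true => rw [hany] at *; simp

-- ===== VERDICT (by name: the statement is the Claim_ definition above) =====
theorem format_remove_duplicates_spec : Claim_equal_format_remove_duplicates := by
  intro text patterns _
  unfold Spec_format_remove_duplicates format_remove_duplicates format_remove_duplicates_alt
  have h := frd_outer patterns ((PySem.Str.split? text "\n").getD [])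
    ((PySem.Str.split? text "\n").getD []) [] [] (by simp)
  simp only [List.length_nil, Int.natCast_zero, List.nil_append] at h
  have hrep : List.replicate patterns.length false
      = patterns.map (fun p => ([] : List String).any (fun l => PySem.Str.isIn p l)) := by
    simp [List.map_const']
  rw [hrep]
  simp only [h]
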